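-- pv_equiv track=rewrite | github.com/tyhts0829/pyxidraw3 | data/regular_polyhedron/regular_polyhedron.py | create_edge_list
-- ===== SOURCE A (Python) =====
-- def create_edge_list(polygon):
--     r = []
--     for poly in polygon:
--         pp = poly[-1]
--         for pn in poly:
--             e = (pp, pn) if pp < pn else (pn, pp)
--             if e not in r:
--                 r.append(e)
--             pp = pn
--     return tuple(sorted(r))
-- ===== SOURCE B (Python) =====
-- def create_edge_list(polygon):
--     edges = [
--         (a, b) if a < b else (b, a)
--         for poly in polygon
--         for a, b in zip([poly[-1]] + poly[:-1], poly)
--     ]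
--     edges.sort()
--     out = []
--     prev = None
--     for e in edges:
--         if e != prev:
--             out.append(e)
--             prev = e
--     return tuple(out)
-- ===== Notes on version B (the rewrite author's own statement) =====
-- stated objective: faster
-- what changed: Edges are produced by zipping each face with its rotation in a flat comprehension (no per-edge membership scan), then deduplicated by one sort plus a single adjacent-duplicate pass, replacing A's O(E^2) 'e not in r' scan.
import Mathlib
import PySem

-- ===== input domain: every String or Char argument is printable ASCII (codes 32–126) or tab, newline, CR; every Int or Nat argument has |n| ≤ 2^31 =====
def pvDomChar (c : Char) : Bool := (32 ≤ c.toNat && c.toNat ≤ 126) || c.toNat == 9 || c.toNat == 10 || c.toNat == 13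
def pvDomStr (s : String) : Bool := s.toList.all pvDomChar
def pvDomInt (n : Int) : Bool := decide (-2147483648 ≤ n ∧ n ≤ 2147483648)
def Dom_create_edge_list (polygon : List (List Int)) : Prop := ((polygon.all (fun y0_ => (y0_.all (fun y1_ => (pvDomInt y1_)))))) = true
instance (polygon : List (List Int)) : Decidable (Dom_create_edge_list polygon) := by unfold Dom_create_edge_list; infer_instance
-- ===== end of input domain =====

-- B builds each face's edges by zipping the face with its rotation (no per-edge membership scan),
-- then deduplicates with one sort plus a single adjacent-duplicate pass; return value only.

-- ===== PORT A =====
def create_edge_list (polygon : List (List Int)) : List (Int × Int) :=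
  let r := polygon.foldl (fun r poly =>
    match PySem.List.pyGet? poly (-1) with
    | none => r      -- Python raises IndexError here (empty face); excluded by Pre_
    | some pp0 =>
      (poly.foldl (fun (s : List (Int × Int) × Int) pn =>
        let e := if s.2 < pn then (s.2, pn) else (pn, s.2)
        (if e ∈ s.1 then s.1 else s.1 ++ [e], pn)) (r, pp0)).1) []
  PySem.List.sorted2 r Prod.fst Prod.snd

-- ===== PORT B =====
def create_edge_list_alt (polygon : List (List Int)) : List (Int × Int) :=
  let edges := polygon.flatMap (fun poly =>
    match PySem.List.pyGet? poly (-1) with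
    | none => []     -- Python raises IndexError here (empty face); excluded by Pre_
    | some last =>
      ((last :: PySem.List.slice poly none (some (-1))).zip poly).map
        (fun ab => if ab.1 < ab.2 then (ab.1, ab.2) else (ab.2, ab.1)))
  let sortedE := PySem.List.sorted2 edges Prod.fst Prod.snd
  (sortedE.foldl (fun (s : List (Int × Int) × Option (Int × Int)) e =>
      if some e = s.2 then s else (s.1 ++ [e], some e)) ([], none)).1

-- ===== PRECONDITION & SPEC =====
-- Pre_ excludes polygons containing an empty face: there 'poly[-1]' raises IndexError in A (and in B).
def Pre_create_edge_list (polygon : List (List Int)) : Prop := ∀ poly ∈ polygon, poly ≠ []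
instance (polygon : List (List Int)) : Decidable (Pre_create_edge_list polygon) := by unfold Pre_create_edge_list; infer_instance
def pvWitness_create_edge_list : List (List Int) := [[0, 1, 2], [1, 2, 3]]

def Spec_create_edge_list (polygon : List (List Int)) (out : List (Int × Int)) : Prop := out = create_edge_list_alt polygon
instance (polygon : List (List Int)) (out : List (Int × Int)) : Decidable (Spec_create_edge_list polygon out) := by unfold Spec_create_edge_list; infer_instance

-- ===== CLAIM (what is proved, stated in full; the proofs are below) =====
def Claim_equal_create_edge_list : Prop := ∀ (polygon : List (List Int)), Dom_create_edge_list polygon → Pre_create_edge_list polygon → Spec_create_edge_list polygon (create_edge_list polygon)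

-- ===== LEMMAS AND PROOFS =====

-- the flat sequence of normalized edges of one face, starting from previous vertex pp
def edgesFrom (pp : Int) : List Int → List (Int × Int)
  | [] => []
  | pn :: t => (if pp < pn then (pp, pn) else (pn, pp)) :: edgesFrom pn t

-- the flat sequence of all edges of the polygon
def allEdges (polygon : List (List Int)) : List (Int × Int) :=
  polygon.flatMap (fun poly =>
    match PySem.List.pyGet? poly (-1) with
    | none => []
    | some pp0 => edgesFrom pp0 poly)

def addIf (acc : List (Int × Int)) (e : Int × Int) : List (Int × Int) :=
  if e ∈ acc then acc else acc ++ [e]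

-- strict lexicographic order on pairs, the order sorted2 sorts by
def lexLt (a b : Int × Int) : Prop := a.1 < b.1 ∨ (a.1 = b.1 ∧ a.2 < b.2)
def lexLe (a b : Int × Int) : Prop := lexLt a b ∨ a = b

theorem lex_irrefl (a : Int × Int) : ¬ lexLt a a := by unfold lexLt; omega

theorem lex_asymm {a b : Int × Int} : lexLt a b → lexLt b a → False := by
  unfold lexLt; omega

theorem lex_of_le_ne {a b : Int × Int} (h : lexLe a b) (hne : a ≠ b) : lexLt a b := by
  rcases h with h | h
  · exact h
  · exact absurd h hne

theorem lex_le_of_not_lt {x y : Int × Int} (h : ¬ lexLt x y) : lexLe y x := by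
  rcases x with ⟨x1, x2⟩; rcases y with ⟨y1, y2⟩
  simp only [lexLt, lexLe, Prod.mk.injEq] at *
  omega

theorem lex_lt_le_trans {x y z : Int × Int} (h1 : lexLt x y) (h2 : lexLe y z) : lexLt x z := by
  rcases x with ⟨x1, x2⟩; rcases y with ⟨y1, y2⟩; rcases z with ⟨z1, z2⟩
  simp only [lexLt, lexLe, Prod.mk.injEq] at *
  omega

-- A's inner loop: the r-component is a fold of addIf over the face's edges
theorem innerA (poly : List Int) : ∀ (pp : Int) (r : List (Int × Int)),
    (poly.foldl (fun (s : List (Int × Int) × Int) pn =>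
        (if (if s.2 < pn then (s.2, pn) else (pn, s.2)) ∈ s.1 then s.1
         else s.1 ++ [if s.2 < pn then (s.2, pn) else (pn, s.2)], pn)) (r, pp)).1
      = (edgesFrom pp poly).foldl addIf r := by
  induction poly with
  | nil => intro pp r; simp [edgesFrom]
  | cons pn t ih => intro pp r; simp only [List.foldl_cons, edgesFrom, addIf]; exact ih pn _

theorem outerA (polygon : List (List Int)) : ∀ (r : List (Int × Int)),
    polygon.foldl (fun r poly =>
      match PySem.List.pyGet? poly (-1) with
      | none => r
      | some pp0 =>
        (poly.foldl (fun (s : List (Int × Int) × Int) pn =>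
          (if (if s.2 < pn then (s.2, pn) else (pn, s.2)) ∈ s.1 then s.1
           else s.1 ++ [if s.2 < pn then (s.2, pn) else (pn, s.2)], pn)) (r, pp0)).1) r
      = (allEdges polygon).foldl addIf r := by
  induction polygon with
  | nil => intro r; simp [allEdges]
  | cons poly t ih =>
    intro r
    cases h : PySem.List.pyGet? poly (-1) with
    | none => simp only [List.foldl_cons, allEdges, List.flatMap_cons, List.foldl_append, h]; exact ih r
    | some pp0 =>
      simp only [List.foldl_cons, allEdges, List.flatMap_cons, List.foldl_append, h]
      rw [innerA]; exact ih _

-- B's edge generation via zip with the rotated face equals edgesFrom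
theorem zipEdges (poly : List Int) : ∀ (pp : Int),
    ((pp :: poly.dropLast).zip poly).map
        (fun ab => if ab.1 < ab.2 then (ab.1, ab.2) else (ab.2, ab.1))
      = edgesFrom pp poly := by
  induction poly with
  | nil => intro pp; simp [edgesFrom]
  | cons x t ih =>
    intro pp
    cases t with
    | nil => simp [edgesFrom]
    | cons y t' =>
      have hdl : (x :: y :: t').dropLast = x :: (y :: t').dropLast := rfl
      rw [hdl, List.zip_cons_cons, List.map_cons, ih x]
      simp [edgesFrom]

-- B's flatMap produces allEdges
theorem edgesB (polygon : List (List Int)) :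
    polygon.flatMap (fun poly =>
      match PySem.List.pyGet? poly (-1) with
      | none => []
      | some last =>
        ((last :: PySem.List.slice poly none (some (-1))).zip poly).map
          (fun ab => if ab.1 < ab.2 then (ab.1, ab.2) else (ab.2, ab.1)))
      = allEdges polygon := by
  unfold allEdges
  apply List.flatMap_congr
  intro poly _
  rw [PySem.List.slice_to_neg_one]
  cases h : PySem.List.pyGet? poly (-1) with
  | none => rfl
  | some last => dsimp only; rw [zipEdges]

-- folds of addIf: membership and nodup
theorem mem_foldl_addIf (l : List (Int × Int)) : ∀ (acc : List (Int × Int)) (x : Int × Int),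
    x ∈ l.foldl addIf acc ↔ x ∈ acc ∨ x ∈ l := by
  induction l with
  | nil => intro acc x; simp
  | cons e t ih =>
    intro acc x
    simp only [List.foldl_cons, ih, addIf]
    split_ifs with h
    · simp only [List.mem_cons]
      constructor
      · rintro (hx | hx)
        · exact Or.inl hx
        · exact Or.inr (Or.inr hx)
      · rintro (hx | hx | hx)
        · exact Or.inl hx
        · exact Or.inl (hx ▸ h)
        · exact Or.inr hx
    · simp only [List.mem_append, List.mem_cons]
      tauto

theorem nodup_foldl_addIf (l : List (Int × Int)) : ∀ (acc : List (Int × Int)),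
    acc.Nodup → (l.foldl addIf acc).Nodup := by
  induction l with
  | nil => intro acc h; simpa using h
  | cons e t ih =>
    intro acc h
    simp only [List.foldl_cons, addIf]
    split_ifs with he
    · exact ih acc h
    · refine ih _ ?_
      rw [List.nodup_append]
      exact ⟨h, List.nodup_singleton e, by
        intro a ha b hb
        simp only [List.mem_singleton] at hb
        exact fun hab => he ((hab.trans hb) ▸ ha)⟩

-- the comparison function sorted2 uses, characterised as lexLt
theorem ltB_true (a b : Int × Int) :
    (decide (a.1 < b.1) || !decide (b.1 < a.1) && decide (a.2 < b.2)) = true ↔ lexLt a b := by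
  simp only [lexLt, Bool.or_eq_true, Bool.and_eq_true, Bool.not_eq_true', decide_eq_true_iff,
    decide_eq_false_iff_not]
  omega

theorem insertBy_cons (before : (Int × Int) → (Int × Int) → Bool) (x y : Int × Int)
    (ys : List (Int × Int)) :
    PySem.List.insertBy before x (y :: ys)
      = if before x y then x :: y :: ys else y :: PySem.List.insertBy before x ys := rfl

theorem insertBy_nil (before : (Int × Int) → (Int × Int) → Bool) (x : Int × Int) :
    PySem.List.insertBy before x [] = [x] := rfl

theorem insertBy_pairwise_lex (x : Int × Int) (ys : List (Int × Int))
    (h : ys.Pairwise lexLe) :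
    (PySem.List.insertBy (fun a b => decide (a.1 < b.1) || !decide (b.1 < a.1) && decide (a.2 < b.2)) x ys).Pairwise lexLe := by
  induction ys with
  | nil => simp [insertBy_nil]
  | cons y t ih =>
    rw [List.pairwise_cons] at h
    rw [insertBy_cons]
    by_cases hxy : lexLt x y
    · rw [if_pos ((ltB_true x y).mpr hxy)]
      rw [List.pairwise_cons]
      refine ⟨?_, List.pairwise_cons.mpr h⟩
      intro z hz
      rcases List.mem_cons.mp hz with hz | hz
      · exact Or.inl (hz ▸ hxy)
      · exact Or.inl (lex_lt_le_trans hxy (h.1 z hz))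
    · rw [if_neg (fun hb => hxy ((ltB_true x y).mp hb))]
      rw [List.pairwise_cons]
      refine ⟨?_, ih h.2⟩
      intro z hz
      rcases (PySem.List.mem_insertBy _ _ _ _).mp hz with hz | hz
      · exact hz ▸ lex_le_of_not_lt hxy
      · exact h.1 z hz

theorem sorted2_pairwise_lexLe (xs : List (Int × Int)) :
    (PySem.List.sorted2 xs Prod.fst Prod.snd).Pairwise lexLe := by
  unfold PySem.List.sorted2
  simp only
  have : ∀ (l acc : List (Int × Int)), acc.Pairwise lexLe →
      (l.foldl (fun acc x => PySem.List.insertBy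
        (fun a b => decide (a.1 < b.1) || !decide (b.1 < a.1) && decide (a.2 < b.2)) x acc) acc).Pairwise lexLe := by
    intro l
    induction l with
    | nil => intro acc h; simpa using h
    | cons x t ih => intro acc h; exact ih _ (insertBy_pairwise_lex x acc h)
  exact this xs [] (by simp)

theorem mem_sorted2 (xs : List (Int × Int)) (x : Int × Int) :
    x ∈ PySem.List.sorted2 xs Prod.fst Prod.snd ↔ x ∈ xs :=
  (PySem.List.sorted2_perm xs Prod.fst Prod.snd false).mem_iff

-- B's dedup pass as a recursion: drop elements equal to the last kept one
def dest (a : Int × Int) : List (Int × Int) → List (Int × Int)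
  | [] => []
  | x :: t => if x = a then dest a t else x :: dest x t

theorem dest_nil (a : Int × Int) : dest a [] = [] := rfl

theorem dest_cons (a x : Int × Int) (t : List (Int × Int)) :
    dest a (x :: t) = if x = a then dest a t else x :: dest x t := rfl

-- B's (acc, prev) fold, after the first element is kept, computes dest
theorem foldl_dedup_prev (xs : List (Int × Int)) : ∀ (ys : List (Int × Int)) (a : Int × Int),
    (xs.foldl (fun (s : List (Int × Int) × Option (Int × Int)) e =>
        if some e = s.2 then s else (s.1 ++ [e], some e)) (ys, some a)).1
      = ys ++ dest a xs := by
  induction xs with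
  | nil => intro ys a; simp [dest_nil]
  | cons x t ih =>
    intro ys a
    simp only [List.foldl_cons, dest_cons]
    by_cases hx : x = a
    · have : (some x : Option (Int × Int)) = some a := by rw [hx]
      rw [if_pos this, if_pos hx]
      exact ih ys a
    · have : ¬ ((some x : Option (Int × Int)) = some a) := by
        simp only [Option.some.injEq]; exact hx
      rw [if_neg this, if_neg hx]
      rw [ih (ys ++ [x]) x]
      simp

theorem mem_dest (xs : List (Int × Int)) : ∀ (a z : Int × Int),
    xs.Pairwise lexLe → (∀ y ∈ xs, lexLe a y) →
    (z ∈ dest a xs ↔ z ∈ xs ∧ z ≠ a) := by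
  induction xs with
  | nil => intro a z _ _; simp [dest_nil]
  | cons x t ih =>
    intro a z hp ha
    rw [List.pairwise_cons] at hp
    rw [dest_cons]
    by_cases hx : x = a
    · rw [if_pos hx]
      subst hx
      rw [ih x z hp.2 hp.1]
      constructor
      · rintro ⟨hz, hne⟩; exact ⟨List.mem_cons_of_mem _ hz, hne⟩
      · rintro ⟨hz, hne⟩
        rcases List.mem_cons.mp hz with hz | hz
        · exact absurd hz hne
        · exact ⟨hz, hne⟩
    · rw [if_neg hx]
      rw [List.mem_cons, ih x z hp.2 hp.1]
      have hax : lexLt a x := lex_of_le_ne (ha x List.mem_cons_self) (fun h => hx h.symm)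
      constructor
      · rintro (hz | ⟨hz, hne⟩)
        · subst hz; exact ⟨List.mem_cons_self, fun h => hx h⟩
        · refine ⟨List.mem_cons_of_mem _ hz, ?_⟩
          intro hza; subst hza
          rcases hp.1 z hz with hlt | heq
          · exact lex_asymm hax hlt
          · exact hx heq
      · rintro ⟨hz, hne⟩
        rcases List.mem_cons.mp hz with hz | hz
        · exact Or.inl hz
        · by_cases hzx : z = x
          · exact Or.inl hzx
          · exact Or.inr ⟨hz, hzx⟩

theorem pairwise_dest (xs : List (Int × Int)) : ∀ (a : Int × Int),
    xs.Pairwise lexLe → (∀ y ∈ xs, lexLe a y) →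
    (dest a xs).Pairwise lexLt := by
  induction xs with
  | nil => intro a _ _; simp [dest_nil]
  | cons x t ih =>
    intro a hp ha
    rw [List.pairwise_cons] at hp
    rw [dest_cons]
    by_cases hx : x = a
    · rw [if_pos hx]; subst hx; exact ih x hp.2 hp.1
    · rw [if_neg hx]
      rw [List.pairwise_cons]
      refine ⟨?_, ih x hp.2 hp.1⟩
      intro z hz
      have hm := (mem_dest t x z hp.2 hp.1).mp hz
      exact lex_of_le_ne (hp.1 z hm.1) (fun h => hm.2 h.symm)

-- two strictly lex-sorted lists with the same members are equal
theorem eq_of_pairwise_lt_of_mem_iff : ∀ (l₁ l₂ : List (Int × Int)),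
    l₁.Pairwise lexLt → l₂.Pairwise lexLt → (∀ x, x ∈ l₁ ↔ x ∈ l₂) → l₁ = l₂ := by
  intro l₁
  induction l₁ with
  | nil =>
    intro l₂ _ _ hm
    cases l₂ with
    | nil => rfl
    | cons b t => exact absurd ((hm b).mpr List.mem_cons_self) (by simp)
  | cons a t₁ ih =>
    intro l₂ h₁ h₂ hm
    cases l₂ with
    | nil => exact absurd ((hm a).mp List.mem_cons_self) (by simp)
    | cons b t₂ =>
      rw [List.pairwise_cons] at h₁ h₂
      have hab : a = b := by
        rcases List.mem_cons.mp ((hm a).mp List.mem_cons_self) with h | h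
        · exact h
        · rcases List.mem_cons.mp ((hm b).mpr List.mem_cons_self) with h' | h'
          · exact h'.symm
          · exact absurd (h₂.1 a h) (fun hc => lex_asymm (h₁.1 b h') hc)
      subst hab
      have ht : t₁ = t₂ := by
        apply ih t₂ h₁.2 h₂.2
        intro x
        constructor
        · intro hx
          have hne : x ≠ a := fun h => lex_irrefl a (h ▸ h₁.1 x hx)
          rcases List.mem_cons.mp ((hm x).mp (List.mem_cons_of_mem _ hx)) with h | h
          · exact absurd h hne
          · exact h
        · intro hx
          have hne : x ≠ a := fun h => lex_irrefl a (h ▸ h₂.1 x hx)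
          rcases List.mem_cons.mp ((hm x).mpr (List.mem_cons_of_mem _ hx)) with h | h
          · exact absurd h hne
          · exact h
      rw [ht]

-- ===== VERDICT (by name: the statement is the Claim_ definition above) =====
theorem create_edge_list_spec : Claim_equal_create_edge_list := by
  intro polygon _ _
  unfold Spec_create_edge_list create_edge_list create_edge_list_alt
  simp only
  rw [outerA, edgesB]
  set E := allEdges polygon with hE
  set R := E.foldl addIf [] with hR
  have hAmem : ∀ x, x ∈ PySem.List.sorted2 R Prod.fst Prod.snd ↔ x ∈ E := by
    intro x; rw [mem_sorted2, hR, mem_foldl_addIf]; simp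
  have hAnodup : (PySem.List.sorted2 R Prod.fst Prod.snd).Nodup :=
    ((PySem.List.sorted2_perm R Prod.fst Prod.snd false).nodup_iff).mpr
      (nodup_foldl_addIf E [] (by simp))
  have hAlt : (PySem.List.sorted2 R Prod.fst Prod.snd).Pairwise lexLt := by
    have := (sorted2_pairwise_lexLe R).and hAnodup
    exact this.imp (fun h => lex_of_le_ne h.1 h.2)
  cases hS : PySem.List.sorted2 E Prod.fst Prod.snd with
  | nil =>
    have hperm := PySem.List.sorted2_perm E Prod.fst Prod.snd false
    rw [hS] at hperm
    have hEnil : E = [] := hperm.symm.eq_nil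
    apply eq_of_pairwise_lt_of_mem_iff _ _ hAlt (by simp)
    intro x; rw [hAmem, hEnil]; simp
  | cons m rest =>
    have hSp : (m :: rest).Pairwise lexLe := hS ▸ sorted2_pairwise_lexLe E
    rw [List.pairwise_cons] at hSp
    have hB : ((m :: rest).foldl (fun (s : List (Int × Int) × Option (Int × Int)) e =>
        if some e = s.2 then s else (s.1 ++ [e], some e)) ([], none)).1
        = m :: dest m rest := by
      simp only [List.foldl_cons]
      rw [if_neg (by simp)]
      simpa using foldl_dedup_prev rest [m] m
    rw [hB]
    apply eq_of_pairwise_lt_of_mem_iff _ _ hAlt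
    · rw [List.pairwise_cons]
      refine ⟨?_, pairwise_dest rest m hSp.2 hSp.1⟩
      intro z hz
      have hm := (mem_dest rest m z hSp.2 hSp.1).mp hz
      exact lex_of_le_ne (hSp.1 z hm.1) (fun h => hm.2 h.symm)
    · intro x
      rw [hAmem, List.mem_cons, mem_dest rest m x hSp.2 hSp.1]
      have hmemE : x ∈ E ↔ x ∈ m :: rest := by rw [← hS, mem_sorted2]
      rw [hmemE, List.mem_cons]
      by_cases hxm : x = m <;> simp [hxm]
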